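-- pv_equiv track=rewrite | github.com/agral/CompetitiveProgramming | AdventOfCode/2024/10/ans.py | walk_b
-- ===== SOURCE A (Python) =====
-- DIRS = [[1, 0], [0, 1], [-1, 0], [0, -1]]
--
-- def walk_b(hmap, H, W):
--     scores = [[0 for _ in row] for row in hmap]
--     for y in range(H):
--         for x in range(W):
--             if hmap[y][x] == 9:
--                 scores[y][x] = 1
--     for h in range(8, -1, -1): # from 8 to 0 with decrement -1
--         for y in range(H):
--             for x in range(W):
--                 for dir in DIRS:
--                     yy, xx = y + dir[0], x + dir[1]
--                     if hmap[y][x] == h and yy >= 0 and yy < H and xx >= 0 and xx < W and hmap[yy][xx] == hmap[y][x] + 1: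
--                         scores[y][x] += scores[yy][xx]
--     ans = 0
--     for y in range(H):
--         for x in range(W):
--             if hmap[y][x] == 0:
--                 ans += scores[y][x]
--
--     return ans
-- ===== SOURCE B (Python) =====
-- def walk_b(hmap, H, W):
--     # Top-down memoized recursion over the DAG of +1-height steps:
--     # rating(y, x) = number of height-increasing trails from (y, x) to any 9-cell.
--     memo = {}
--
--     def rating(y, x):
--         if (y, x) in memo:
--             return memo[(y, x)]
--         if hmap[y][x] == 9:
--             r = 1
--         else:
--             r = 0
--             for dy, dx in ((1, 0), (0, 1), (-1, 0), (0, -1)):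
--                 yy, xx = y + dy, x + dx
--                 if 0 <= yy < H and 0 <= xx < W and hmap[yy][xx] == hmap[y][x] + 1:
--                     r += rating(yy, xx)
--         memo[(y, x)] = r
--         return r
--
--     return sum(rating(y, x) for y in range(H) for x in range(W) if hmap[y][x] == 0)
-- ===== Notes on version B (the rewrite author's own statement) =====
-- stated objective: alternative
-- what changed: Replaces A's bottom-up height-level sweeps over a mutable scores grid (ten full-grid passes plus a seeding and a summing pass) with top-down memoized recursion rating(y,x) over the DAG of +1-height steps, summed over the height-0 cells.
import Mathlib
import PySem

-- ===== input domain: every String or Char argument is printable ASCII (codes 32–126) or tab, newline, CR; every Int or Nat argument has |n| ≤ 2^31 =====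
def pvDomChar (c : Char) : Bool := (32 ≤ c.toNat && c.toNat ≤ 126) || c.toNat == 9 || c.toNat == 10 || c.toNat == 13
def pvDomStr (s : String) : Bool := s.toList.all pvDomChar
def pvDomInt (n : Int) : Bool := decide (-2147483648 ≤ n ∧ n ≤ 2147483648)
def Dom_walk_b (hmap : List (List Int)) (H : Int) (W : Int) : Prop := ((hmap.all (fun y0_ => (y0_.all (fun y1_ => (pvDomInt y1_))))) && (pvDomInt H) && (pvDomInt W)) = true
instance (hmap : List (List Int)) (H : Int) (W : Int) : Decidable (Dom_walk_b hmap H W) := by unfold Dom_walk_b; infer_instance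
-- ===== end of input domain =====

-- B replaces A's bottom-up height-level full-grid sweeps by top-down memoized recursion
-- over the DAG of +1-height steps (objective: alternative decomposition, same cost order).

-- ===== PORT A =====
-- hmap[y][x]: exact under Pre_walk_b (index in range); pyGetD is Python indexing with a default.
def pvGet2 (m : List (List Int)) (y x : Int) : Int :=
  PySem.List.pyGetD (PySem.List.pyGetD m y []) x 0

-- scores[y][x] = v (item assignment on the nested list); exact under Pre_walk_b.
def aSet2 (s : List (List Int)) (y x : Int) (v : Int) : List (List Int) :=
  PySem.List.pySetD s y (PySem.List.pySetD (PySem.List.pyGetD s y []) x v)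

-- DIRS = [[1, 0], [0, 1], [-1, 0], [0, -1]]
def aDirs : List (Int × Int) := [(1, 0), (0, 1), (-1, 0), (0, -1)]

-- the body of A's innermost `for dir in DIRS` loop
def aCell (hmap : List (List Int)) (H W h : Int) (s : List (List Int)) (y x : Int) :
    List (List Int) :=
  aDirs.foldl (fun sc d =>
    if pvGet2 hmap y x = h ∧ 0 ≤ y + d.1 ∧ y + d.1 < H ∧ 0 ≤ x + d.2 ∧ x + d.2 < W ∧
        pvGet2 hmap (y + d.1) (x + d.2) = pvGet2 hmap y x + 1 then
      aSet2 sc y x (pvGet2 sc y x + pvGet2 sc (y + d.1) (x + d.2))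
    else sc) s

def walk_b (hmap : List (List Int)) (H : Int) (W : Int) : Int :=
  -- scores = [[0 for _ in row] for row in hmap]
  let scores0 := hmap.map (fun row => row.map (fun _ => (0 : Int)))
  -- first double loop: seed the 9-cells
  let s1 := (PySem.List.pyRange 0 H 1).foldl (fun sc y =>
      (PySem.List.pyRange 0 W 1).foldl (fun sc x =>
        if pvGet2 hmap y x = 9 then aSet2 sc y x 1 else sc) sc) scores0
  -- for h in range(8, -1, -1): the level sweeps
  let s2 := (PySem.List.pyRange 8 (-1) (-1)).foldl (fun sc h =>
      (PySem.List.pyRange 0 H 1).foldl (fun sc y =>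
        (PySem.List.pyRange 0 W 1).foldl (fun sc x => aCell hmap H W h sc y x) sc) sc) s1
  -- final accumulation over the 0-cells
  (PySem.List.pyRange 0 H 1).foldl (fun ans y =>
    (PySem.List.pyRange 0 W 1).foldl (fun ans x =>
      if pvGet2 hmap y x = 0 then ans + pvGet2 s2 y x else ans) ans) 0

-- ===== PORT B =====
def bDirs : List (Int × Int) := [(1, 0), (0, 1), (-1, 0), (0, -1)]

-- rating(y, x) with the shared memo threaded through; the fuel argument only makes the
-- recursion total (every actual call has fuel ≥ 10 - height, which never runs out).
def bGo (hmap : List (List Int)) (H W : Int) :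
    Nat → Int → Int → PySem.Dict (Int × Int) Int → Int × PySem.Dict (Int × Int) Int
  | 0, _, _, memo => (0, memo)
  | f + 1, y, x, memo =>
    match memo.get? (y, x) with
    | some v => (v, memo)
    | none =>
      if pvGet2 hmap y x = 9 then (1, memo.insert (y, x) 1)
      else
        let st := bDirs.foldl (fun (st : Int × PySem.Dict (Int × Int) Int) d =>
          if 0 ≤ y + d.1 ∧ y + d.1 < H ∧ 0 ≤ x + d.2 ∧ x + d.2 < W ∧
              pvGet2 hmap (y + d.1) (x + d.2) = pvGet2 hmap y x + 1 then
            let p := bGo hmap H W f (y + d.1) (x + d.2) st.2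
            (st.1 + p.1, p.2)
          else st) (0, memo)
        (st.1, st.2.insert (y, x) st.1)

def walk_b_alt (hmap : List (List Int)) (H : Int) (W : Int) : Int :=
  -- sum(rating(y, x) for y in range(H) for x in range(W) if hmap[y][x] == 0)
  ((PySem.List.pyRange 0 H 1).foldl (fun (st : Int × PySem.Dict (Int × Int) Int) y =>
      (PySem.List.pyRange 0 W 1).foldl (fun st x =>
        if pvGet2 hmap y x = 0 then
          let p := bGo hmap H W 10 y x st.2
          (st.1 + p.1, p.2)
        else st) st) (0, PySem.Dict.empty)).1

-- ===== PRECONDITION & SPEC =====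
-- Pre_ excludes exactly the inputs where A's hmap[y][x] raises IndexError: when both loop
-- ranges are nonempty, the first H rows must exist and each must have at least W entries.
def Pre_walk_b (hmap : List (List Int)) (H : Int) (W : Int) : Prop :=
  0 < H → 0 < W →
    H ≤ (hmap.length : Int) ∧ ∀ row ∈ hmap.take H.toNat, W ≤ (row.length : Int)

instance (hmap : List (List Int)) (H : Int) (W : Int) : Decidable (Pre_walk_b hmap H W) := by
  unfold Pre_walk_b; infer_instance

def pvWitness_walk_b : List (List Int) × Int × Int := ([[0, 1], [3, 2]], 2, 2)

def Spec_walk_b (hmap : List (List Int)) (H : Int) (W : Int) (out : Int) : Prop :=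
  out = walk_b_alt hmap H W
instance (hmap : List (List Int)) (H : Int) (W : Int) (out : Int) :
    Decidable (Spec_walk_b hmap H W out) := by unfold Spec_walk_b; infer_instance

-- ===== CLAIM (what is proved, stated in full; the proofs are below) =====
def Claim_equal_walk_b : Prop := ∀ (hmap : List (List Int)) (H : Int) (W : Int),
  Dom_walk_b hmap H W → Pre_walk_b hmap H W → Spec_walk_b hmap H W (walk_b hmap H W)

-- ===== LEMMAS AND PROOFS =====

-- the canonical rating value, with explicit fuel (pure, proof-layer only);
-- neighbour offsets written exactly as the unfolded direction list produces them
def rat (hmap : List (List Int)) (H W : Int) : Nat → Int → Int → Int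
  | 0, _, _ => 0
  | f + 1, y, x =>
    if pvGet2 hmap y x = 9 then 1
    else
      (if 0 ≤ y + 1 ∧ y + 1 < H ∧ 0 ≤ x + 0 ∧ x + 0 < W ∧
            pvGet2 hmap (y + 1) (x + 0) = pvGet2 hmap y x + 1
          then rat hmap H W f (y + 1) (x + 0) else 0)
        + (if 0 ≤ y + 0 ∧ y + 0 < H ∧ 0 ≤ x + 1 ∧ x + 1 < W ∧
            pvGet2 hmap (y + 0) (x + 1) = pvGet2 hmap y x + 1
          then rat hmap H W f (y + 0) (x + 1) else 0)
        + (if 0 ≤ y + -1 ∧ y + -1 < H ∧ 0 ≤ x + 0 ∧ x + 0 < W ∧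
            pvGet2 hmap (y + -1) (x + 0) = pvGet2 hmap y x + 1
          then rat hmap H W f (y + -1) (x + 0) else 0)
        + (if 0 ≤ y + 0 ∧ y + 0 < H ∧ 0 ≤ x + -1 ∧ x + -1 < W ∧
            pvGet2 hmap (y + 0) (x + -1) = pvGet2 hmap y x + 1
          then rat hmap H W f (y + 0) (x + -1) else 0)

def Rv (hmap : List (List Int)) (H W y x : Int) : Int := rat hmap H W 10 y x

-- the one-level increment a cell receives in A's sweep, read from scores matrix s
def dSum (hmap : List (List Int)) (H W : Int) (s : List (List Int)) (y x : Int) : Int :=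
  (if 0 ≤ y + 1 ∧ y + 1 < H ∧ 0 ≤ x + 0 ∧ x + 0 < W ∧
        pvGet2 hmap (y + 1) (x + 0) = pvGet2 hmap y x + 1
      then pvGet2 s (y + 1) (x + 0) else 0)
    + (if 0 ≤ y + 0 ∧ y + 0 < H ∧ 0 ≤ x + 1 ∧ x + 1 < W ∧
        pvGet2 hmap (y + 0) (x + 1) = pvGet2 hmap y x + 1
      then pvGet2 s (y + 0) (x + 1) else 0)
    + (if 0 ≤ y + -1 ∧ y + -1 < H ∧ 0 ≤ x + 0 ∧ x + 0 < W ∧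
        pvGet2 hmap (y + -1) (x + 0) = pvGet2 hmap y x + 1
      then pvGet2 s (y + -1) (x + 0) else 0)
    + (if 0 ≤ y + 0 ∧ y + 0 < H ∧ 0 ≤ x + -1 ∧ x + -1 < W ∧
        pvGet2 hmap (y + 0) (x + -1) = pvGet2 hmap y x + 1
      then pvGet2 s (y + 0) (x + -1) else 0)

-- scores value after all levels down to h have been swept
def Gv (hmap : List (List Int)) (H W h y x : Int) : Int :=
  if (0 ≤ y ∧ y < H ∧ 0 ≤ x ∧ x < W) ∧ h ≤ pvGet2 hmap y x ∧ pvGet2 hmap y x ≤ 9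
  then Rv hmap H W y x else 0

def ShapeOK (hmap s : List (List Int)) : Prop :=
  s.length = hmap.length ∧ ∀ i : Nat, (s.getD i []).length = (hmap.getD i []).length

-- ---- indexing toolbox ----

theorem pvGet2_eq (m : List (List Int)) (y x : Int) (hy : 0 ≤ y) (hx : 0 ≤ x) :
    pvGet2 m y x = (m.getD y.toNat []).getD x.toNat 0 := by
  obtain ⟨a, rfl⟩ : ∃ a : Nat, y = (a : Int) := ⟨y.toNat, (Int.toNat_of_nonneg hy).symm⟩
  obtain ⟨b, rfl⟩ : ∃ b : Nat, x = (b : Int) := ⟨x.toNat, (Int.toNat_of_nonneg hx).symm⟩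
  simp [pvGet2]

theorem aSet2_eq (s : List (List Int)) (y x v : Int) (hy : 0 ≤ y) (hx : 0 ≤ x) :
    aSet2 s y x v = s.set y.toNat ((s.getD y.toNat []).set x.toNat v) := by
  obtain ⟨a, rfl⟩ : ∃ a : Nat, y = (a : Int) := ⟨y.toNat, (Int.toNat_of_nonneg hy).symm⟩
  obtain ⟨b, rfl⟩ : ∃ b : Nat, x = (b : Int) := ⟨x.toNat, (Int.toNat_of_nonneg hx).symm⟩
  simp [aSet2]

theorem getD_set_self {α : Type} (l : List α) (n : Nat) (r d : α) (h : n < l.length) :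
    (l.set n r).getD n d = r := by
  simp [List.getD_eq_getElem?_getD, List.getElem?_set_self', h]

theorem getD_set_ne {α : Type} (l : List α) (n m : Nat) (r d : α) (h : n ≠ m) :
    (l.set n r).getD m d = l.getD m d := by
  simp [List.getD_eq_getElem?_getD, List.getElem?_set_ne h]

theorem shape_aSet2 (hmap s : List (List Int)) (y x v : Int) (hs : ShapeOK hmap s)
    (hy : 0 ≤ y) (hx : 0 ≤ x) : ShapeOK hmap (aSet2 s y x v) := by
  rw [aSet2_eq _ _ _ _ hy hx]
  obtain ⟨h1, h2⟩ := hs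
  refine ⟨by simpa using h1, fun i => ?_⟩
  by_cases hi : y.toNat = i
  · subst hi
    by_cases hlen : y.toNat < s.length
    · rw [getD_set_self _ _ _ _ hlen, List.length_set]; exact h2 _
    · rw [List.set_eq_of_length_le (by omega)]; exact h2 _
  · rw [getD_set_ne _ _ _ _ _ hi]; exact h2 _

theorem pvGet2_aSet2 (s : List (List Int)) (y x v y' x' : Int)
    (hy : 0 ≤ y) (hx : 0 ≤ x) (hy' : 0 ≤ y') (hx' : 0 ≤ x')
    (hyl : y.toNat < s.length) (hxl : x.toNat < (s.getD y.toNat []).length) :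
    pvGet2 (aSet2 s y x v) y' x' = if y' = y ∧ x' = x then v else pvGet2 s y' x' := by
  rw [aSet2_eq _ _ _ _ hy hx, pvGet2_eq _ _ _ hy' hx', pvGet2_eq _ _ _ hy' hx']
  by_cases hyy : y' = y
  · subst hyy
    rw [getD_set_self _ _ _ _ hyl]
    by_cases hxx : x' = x
    · subst hxx
      rw [getD_set_self _ _ _ _ hxl]; simp
    · have hne : x.toNat ≠ x'.toNat := by omega
      rw [getD_set_ne _ _ _ _ _ hne]; simp [hxx]
  · have hne : y.toNat ≠ y'.toNat := by omega
    rw [getD_set_ne _ _ _ _ _ hne]; simp [hyy]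

theorem row_ge (hmap : List (List Int)) (H W : Int) (hH : H ≤ (hmap.length : Int))
    (hW : ∀ row ∈ hmap.take H.toNat, W ≤ (row.length : Int)) (y : Int)
    (hy0 : 0 ≤ y) (hyH : y < H) : W ≤ ((hmap.getD y.toNat []).length : Int) := by
  have h1 : y.toNat < hmap.length := by omega
  have h2 : y.toNat < H.toNat := by omega
  apply hW
  rw [List.getD_eq_getElem _ _ h1]
  have h3 : y.toNat < (hmap.take H.toNat).length := by
    simp [List.length_take]; omega
  have h4 : (hmap.take H.toNat)[y.toNat]'h3 = hmap[y.toNat]'h1 := List.getElem_take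
  rw [← h4]
  exact List.getElem_mem h3

theorem cell_inrange (hmap s : List (List Int)) (H W : Int) (hs : ShapeOK hmap s)
    (hH : H ≤ (hmap.length : Int)) (hW : ∀ row ∈ hmap.take H.toNat, W ≤ (row.length : Int))
    (y x : Int) (hy0 : 0 ≤ y) (hyH : y < H) (hx0 : 0 ≤ x) (hxW : x < W) :
    y.toNat < s.length ∧ x.toNat < (s.getD y.toNat []).length := by
  constructor
  · rw [hs.1]; omega
  · rw [hs.2 y.toNat]
    have := row_ge hmap H W hH hW y hy0 hyH
    omega

theorem dSum_congr (hmap : List (List Int)) (H W : Int) (s t : List (List Int)) (y x : Int)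
    (h : ∀ yy xx, 0 ≤ yy → 0 ≤ xx → pvGet2 hmap yy xx = pvGet2 hmap y x + 1 →
      pvGet2 t yy xx = pvGet2 s yy xx) :
    dSum hmap H W t y x = dSum hmap H W s y x := by
  unfold dSum
  have e1 : (if 0 ≤ y + 1 ∧ y + 1 < H ∧ 0 ≤ x + 0 ∧ x + 0 < W ∧
        pvGet2 hmap (y + 1) (x + 0) = pvGet2 hmap y x + 1
      then pvGet2 t (y + 1) (x + 0) else 0)
      = (if 0 ≤ y + 1 ∧ y + 1 < H ∧ 0 ≤ x + 0 ∧ x + 0 < W ∧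
        pvGet2 hmap (y + 1) (x + 0) = pvGet2 hmap y x + 1
      then pvGet2 s (y + 1) (x + 0) else 0) := by
    split_ifs with hc
    · exact h _ _ hc.1 hc.2.2.1 hc.2.2.2.2
    · rfl
  have e2 : (if 0 ≤ y + 0 ∧ y + 0 < H ∧ 0 ≤ x + 1 ∧ x + 1 < W ∧
        pvGet2 hmap (y + 0) (x + 1) = pvGet2 hmap y x + 1
      then pvGet2 t (y + 0) (x + 1) else 0)
      = (if 0 ≤ y + 0 ∧ y + 0 < H ∧ 0 ≤ x + 1 ∧ x + 1 < W ∧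
        pvGet2 hmap (y + 0) (x + 1) = pvGet2 hmap y x + 1
      then pvGet2 s (y + 0) (x + 1) else 0) := by
    split_ifs with hc
    · exact h _ _ hc.1 hc.2.2.1 hc.2.2.2.2
    · rfl
  have e3 : (if 0 ≤ y + -1 ∧ y + -1 < H ∧ 0 ≤ x + 0 ∧ x + 0 < W ∧
        pvGet2 hmap (y + -1) (x + 0) = pvGet2 hmap y x + 1
      then pvGet2 t (y + -1) (x + 0) else 0)
      = (if 0 ≤ y + -1 ∧ y + -1 < H ∧ 0 ≤ x + 0 ∧ x + 0 < W ∧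
        pvGet2 hmap (y + -1) (x + 0) = pvGet2 hmap y x + 1
      then pvGet2 s (y + -1) (x + 0) else 0) := by
    split_ifs with hc
    · exact h _ _ hc.1 hc.2.2.1 hc.2.2.2.2
    · rfl
  have e4 : (if 0 ≤ y + 0 ∧ y + 0 < H ∧ 0 ≤ x + -1 ∧ x + -1 < W ∧
        pvGet2 hmap (y + 0) (x + -1) = pvGet2 hmap y x + 1
      then pvGet2 t (y + 0) (x + -1) else 0)
      = (if 0 ≤ y + 0 ∧ y + 0 < H ∧ 0 ≤ x + -1 ∧ x + -1 < W ∧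
        pvGet2 hmap (y + 0) (x + -1) = pvGet2 hmap y x + 1
      then pvGet2 s (y + 0) (x + -1) else 0) := by
    split_ifs with hc
    · exact h _ _ hc.1 hc.2.2.1 hc.2.2.2.2
    · rfl
  rw [e1, e2, e3, e4]

-- ---- fuel stability of rat ----

theorem rat_unfold (hmap : List (List Int)) (H W : Int) (f : Nat) (y x : Int) :
    rat hmap H W (f + 1) y x =
      (if pvGet2 hmap y x = 9 then 1
      else
        (if 0 ≤ y + 1 ∧ y + 1 < H ∧ 0 ≤ x + 0 ∧ x + 0 < W ∧
              pvGet2 hmap (y + 1) (x + 0) = pvGet2 hmap y x + 1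
            then rat hmap H W f (y + 1) (x + 0) else 0)
          + (if 0 ≤ y + 0 ∧ y + 0 < H ∧ 0 ≤ x + 1 ∧ x + 1 < W ∧
              pvGet2 hmap (y + 0) (x + 1) = pvGet2 hmap y x + 1
            then rat hmap H W f (y + 0) (x + 1) else 0)
          + (if 0 ≤ y + -1 ∧ y + -1 < H ∧ 0 ≤ x + 0 ∧ x + 0 < W ∧
              pvGet2 hmap (y + -1) (x + 0) = pvGet2 hmap y x + 1
            then rat hmap H W f (y + -1) (x + 0) else 0)
          + (if 0 ≤ y + 0 ∧ y + 0 < H ∧ 0 ≤ x + -1 ∧ x + -1 < W ∧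
              pvGet2 hmap (y + 0) (x + -1) = pvGet2 hmap y x + 1
            then rat hmap H W f (y + 0) (x + -1) else 0)) := rfl

theorem rat_stable (hmap : List (List Int)) (H W : Int) :
    ∀ (f g : Nat) (y x : Int), pvGet2 hmap y x ≤ 9 →
      (10 : Int) - pvGet2 hmap y x ≤ (f : Int) → (10 : Int) - pvGet2 hmap y x ≤ (g : Int) →
      rat hmap H W f y x = rat hmap H W g y x := by
  intro f
  induction f with
  | zero =>
    intro g y x h9 hf hg
    exfalso; push_cast at hf; omega
  | succ f ihf =>
    intro g y x h9 hf hg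
    cases g with
    | zero => exfalso; push_cast at hg; omega
    | succ g =>
      rw [rat_unfold, rat_unfold]
      by_cases h99 : pvGet2 hmap y x = 9
      · rw [if_pos h99, if_pos h99]
      · rw [if_neg h99, if_neg h99]
        push_cast at hf hg
        have eAll : ∀ dy dx : Int,
            (if 0 ≤ y + dy ∧ y + dy < H ∧ 0 ≤ x + dx ∧ x + dx < W ∧
              pvGet2 hmap (y + dy) (x + dx) = pvGet2 hmap y x + 1
            then rat hmap H W f (y + dy) (x + dx) else 0)
            = (if 0 ≤ y + dy ∧ y + dy < H ∧ 0 ≤ x + dx ∧ x + dx < W ∧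
              pvGet2 hmap (y + dy) (x + dx) = pvGet2 hmap y x + 1
            then rat hmap H W g (y + dy) (x + dx) else 0) := by
          intro dy dx
          split_ifs with hc
          · refine ihf g _ _ ?_ ?_ ?_ <;> rw [hc.2.2.2.2] <;> omega
          · rfl
        rw [eAll 1 0, eAll 0 1, eAll (-1) 0, eAll 0 (-1)]

theorem Rv_of_nine (hmap : List (List Int)) (H W y x : Int) (h9 : pvGet2 hmap y x = 9) :
    Rv hmap H W y x = 1 := by
  unfold Rv
  rw [show rat hmap H W 10 y x = rat hmap H W (9 + 1) y x from rfl, rat_unfold hmap H W 9 y x, if_pos h9]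

-- ---- phase 1: seeding the 9-cells ----

theorem p1x (hmap : List (List Int)) (H W : Int)
    (hH : H ≤ (hmap.length : Int)) (hW : ∀ row ∈ hmap.take H.toNat, W ≤ (row.length : Int))
    (y : Int) (hy0 : 0 ≤ y) (hyH : y < H) :
    ∀ (xs : List Int) (s : List (List Int)), ShapeOK hmap s → (∀ x ∈ xs, 0 ≤ x ∧ x < W) →
      ShapeOK hmap (xs.foldl (fun sc x => if pvGet2 hmap y x = 9 then aSet2 sc y x 1 else sc) s) ∧
      ∀ y' x', 0 ≤ y' → 0 ≤ x' →
        pvGet2 (xs.foldl (fun sc x => if pvGet2 hmap y x = 9 then aSet2 sc y x 1 else sc) s) y' x' =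
          if y' = y ∧ x' ∈ xs ∧ pvGet2 hmap y' x' = 9 then 1 else pvGet2 s y' x' := by
  intro xs
  induction xs with
  | nil =>
    intro s hs _
    refine ⟨hs, fun y' x' _ _ => ?_⟩
    simp
  | cons x0 xs ih =>
    intro s hs hxs
    have hx0 := hxs x0 (by simp)
    simp only [List.foldl_cons]
    have hshape' : ShapeOK hmap (if pvGet2 hmap y x0 = 9 then aSet2 s y x0 1 else s) := by
      split_ifs
      · exact shape_aSet2 hmap s y x0 1 hs hy0 hx0.1
      · exact hs
    have hir := cell_inrange hmap s H W hs hH hW y x0 hy0 hyH hx0.1 hx0.2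
    have hpv' : ∀ y' x', 0 ≤ y' → 0 ≤ x' →
        pvGet2 (if pvGet2 hmap y x0 = 9 then aSet2 s y x0 1 else s) y' x' =
          if y' = y ∧ x' = x0 ∧ pvGet2 hmap y x0 = 9 then 1 else pvGet2 s y' x' := by
      intro y' x' hy' hx'
      by_cases h9 : pvGet2 hmap y x0 = 9
      · rw [if_pos h9, pvGet2_aSet2 s y x0 1 y' x' hy0 hx0.1 hy' hx' hir.1 hir.2]
        by_cases hc : y' = y ∧ x' = x0
        · rw [if_pos hc, if_pos ⟨hc.1, hc.2, h9⟩]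
        · have hnc : ¬(y' = y ∧ x' = x0 ∧ pvGet2 hmap y x0 = 9) := fun hq => hc ⟨hq.1, hq.2.1⟩
          rw [if_neg hc, if_neg hnc]
      · have hnc : ¬(y' = y ∧ x' = x0 ∧ pvGet2 hmap y x0 = 9) := fun hq => h9 hq.2.2
        rw [if_neg h9, if_neg hnc]
    obtain ⟨ihs, ihp⟩ := ih _ hshape' (fun x hx => hxs x (by simp [hx]))
    refine ⟨ihs, fun y' x' hy' hx' => ?_⟩
    rw [ihp y' x' hy' hx']
    by_cases h1 : y' = y ∧ x' ∈ xs ∧ pvGet2 hmap y' x' = 9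
    · rw [if_pos h1, if_pos ⟨h1.1, by simp [h1.2.1], h1.2.2⟩]
    · rw [if_neg h1, hpv' y' x' hy' hx']
      by_cases h2 : y' = y ∧ x' = x0 ∧ pvGet2 hmap y x0 = 9
      · obtain ⟨e1, e2, e3⟩ := h2
        rw [if_pos ⟨e1, e2, e3⟩, if_pos ⟨e1, by simp [e2], by rw [e1, e2]; exact e3⟩]
      · rw [if_neg h2, if_neg]
        intro hq
        obtain ⟨a, b, c⟩ := hq
        rcases List.mem_cons.mp b with b | b
        · exact h2 ⟨a, b, by rw [← a, ← b]; exact c⟩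
        · exact h1 ⟨a, b, c⟩

theorem p1y (hmap : List (List Int)) (H W : Int)
    (hH : H ≤ (hmap.length : Int)) (hW : ∀ row ∈ hmap.take H.toNat, W ≤ (row.length : Int)) :
    ∀ (ys : List Int) (s : List (List Int)), ShapeOK hmap s → (∀ y ∈ ys, 0 ≤ y ∧ y < H) →
      ShapeOK hmap (ys.foldl (fun sc y => (PySem.List.pyRange 0 W 1).foldl
        (fun sc x => if pvGet2 hmap y x = 9 then aSet2 sc y x 1 else sc) sc) s) ∧
      ∀ y' x', 0 ≤ y' → 0 ≤ x' →
        pvGet2 (ys.foldl (fun sc y => (PySem.List.pyRange 0 W 1).foldl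
          (fun sc x => if pvGet2 hmap y x = 9 then aSet2 sc y x 1 else sc) sc) s) y' x' =
          if y' ∈ ys ∧ x' < W ∧ pvGet2 hmap y' x' = 9 then 1 else pvGet2 s y' x' := by
  intro ys
  induction ys with
  | nil =>
    intro s hs _
    refine ⟨hs, fun y' x' _ _ => ?_⟩
    simp
  | cons y0 ys ih =>
    intro s hs hys
    have hy0 := hys y0 (by simp)
    simp only [List.foldl_cons]
    obtain ⟨hs', hp'⟩ := p1x hmap H W hH hW y0 hy0.1 hy0.2 (PySem.List.pyRange 0 W 1) s hs
      (fun x hx => (PySem.List.mem_pyRange_one.mp hx))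
    obtain ⟨ihs, ihp⟩ := ih _ hs' (fun yq hq => hys yq (by simp [hq]))
    refine ⟨ihs, fun y' x' hy' hx' => ?_⟩
    rw [ihp y' x' hy' hx']
    by_cases h1 : y' ∈ ys ∧ x' < W ∧ pvGet2 hmap y' x' = 9
    · rw [if_pos h1, if_pos ⟨by simp [h1.1], h1.2.1, h1.2.2⟩]
    · rw [if_neg h1, hp' y' x' hy' hx']
      by_cases h2 : y' = y0 ∧ x' ∈ PySem.List.pyRange 0 W 1 ∧ pvGet2 hmap y' x' = 9
      · rw [if_pos h2,
          if_pos ⟨by simp [h2.1], (PySem.List.mem_pyRange_one.mp h2.2.1).2, h2.2.2⟩]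
      · rw [if_neg h2, if_neg]
        intro hq
        obtain ⟨a, b, c⟩ := hq
        rcases List.mem_cons.mp a with a | a
        · exact h2 ⟨a, PySem.List.mem_pyRange_one.mpr ⟨hx', b⟩, c⟩
        · exact h1 ⟨a, b, c⟩

-- ---- phase 2: one cell ----

theorem aCell_pv (hmap : List (List Int)) (H W h : Int)
    (hH : H ≤ (hmap.length : Int)) (hW : ∀ row ∈ hmap.take H.toNat, W ≤ (row.length : Int))
    (s : List (List Int)) (hs : ShapeOK hmap s) (y x : Int)
    (hy0 : 0 ≤ y) (hyH : y < H) (hx0 : 0 ≤ x) (hxW : x < W) :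
    ShapeOK hmap (aCell hmap H W h s y x) ∧
    ∀ y' x', 0 ≤ y' → 0 ≤ x' →
      pvGet2 (aCell hmap H W h s y x) y' x' =
        if y' = y ∧ x' = x ∧ pvGet2 hmap y x = h
        then pvGet2 s y x + dSum hmap H W s y x else pvGet2 s y' x' := by
  unfold aCell aDirs
  simp only [List.foldl_cons, List.foldl_nil]
  by_cases hh : pvGet2 hmap y x = h
  · -- chain of four conditional updates of the single cell (y, x)
    have hstep : ∀ (t : List (List Int)) (acc : Int) (dy dx : Int),
        ¬(y + dy = y ∧ x + dx = x) →
        (ShapeOK hmap t ∧ ∀ y' x', 0 ≤ y' → 0 ≤ x' →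
          pvGet2 t y' x' = if y' = y ∧ x' = x then pvGet2 s y x + acc else pvGet2 s y' x') →
        (ShapeOK hmap (if pvGet2 hmap y x = h ∧ 0 ≤ y + dy ∧ y + dy < H ∧ 0 ≤ x + dx ∧ x + dx < W ∧
              pvGet2 hmap (y + dy) (x + dx) = pvGet2 hmap y x + 1
            then aSet2 t y x (pvGet2 t y x + pvGet2 t (y + dy) (x + dx)) else t) ∧
          ∀ y' x', 0 ≤ y' → 0 ≤ x' →
            pvGet2 (if pvGet2 hmap y x = h ∧ 0 ≤ y + dy ∧ y + dy < H ∧ 0 ≤ x + dx ∧ x + dx < W ∧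
                pvGet2 hmap (y + dy) (x + dx) = pvGet2 hmap y x + 1
              then aSet2 t y x (pvGet2 t y x + pvGet2 t (y + dy) (x + dx)) else t) y' x' =
              if y' = y ∧ x' = x
              then pvGet2 s y x + (acc + (if 0 ≤ y + dy ∧ y + dy < H ∧ 0 ≤ x + dx ∧ x + dx < W ∧
                pvGet2 hmap (y + dy) (x + dx) = pvGet2 hmap y x + 1
                then pvGet2 s (y + dy) (x + dx) else 0))
              else pvGet2 s y' x') := by
      intro t acc dy dx hne ht
      obtain ⟨hts, htp⟩ := ht
      by_cases hc : 0 ≤ y + dy ∧ y + dy < H ∧ 0 ≤ x + dx ∧ x + dx < W ∧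
          pvGet2 hmap (y + dy) (x + dx) = pvGet2 hmap y x + 1
      · have hBig := And.intro hh hc
        rw [if_pos hBig]
        have hir := cell_inrange hmap t H W hts hH hW y x hy0 hyH hx0 hxW
        refine ⟨shape_aSet2 hmap t y x _ hts hy0 hx0, fun y' x' hy' hx' => ?_⟩
        rw [pvGet2_aSet2 t y x _ y' x' hy0 hx0 hy' hx' hir.1 hir.2]
        rw [if_pos hc]
        have htriv : (y = y ∧ x = x) := ⟨rfl, rfl⟩
        split_ifs with he
        · rw [htp y x hy0 hx0, if_pos htriv, htp _ _ hc.1 hc.2.2.1, if_neg hne]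
          ring
        · rw [htp y' x' hy' hx', if_neg he]
      · have hnBig : ¬(pvGet2 hmap y x = h ∧ 0 ≤ y + dy ∧ y + dy < H ∧ 0 ≤ x + dx ∧ x + dx < W ∧
            pvGet2 hmap (y + dy) (x + dx) = pvGet2 hmap y x + 1) := fun hq => hc hq.2
        rw [if_neg hnBig, if_neg hc]
        refine ⟨hts, fun y' x' hy' hx' => ?_⟩
        rw [htp y' x' hy' hx', add_zero]
    have hP0 : ShapeOK hmap s ∧ ∀ y' x', 0 ≤ y' → 0 ≤ x' →
        pvGet2 s y' x' = if y' = y ∧ x' = x then pvGet2 s y x + 0 else pvGet2 s y' x' := by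
      refine ⟨hs, fun y' x' _ _ => ?_⟩
      split_ifs with hc
      · rw [hc.1, hc.2, add_zero]
      · rfl
    have h1 := hstep s 0 1 0 (by intro hq; omega) hP0
    have h2 := hstep _ _ 0 1 (by intro hq; omega) h1
    have h3 := hstep _ _ (-1) 0 (by intro hq; omega) h2
    have h4 := hstep _ _ 0 (-1) (by intro hq; omega) h3
    refine ⟨h4.1, fun y' x' hy' hx' => ?_⟩
    refine (h4.2 y' x' hy' hx').trans ?_
    by_cases hc : y' = y ∧ x' = x
    · have hcc := And.intro hc.1 (And.intro hc.2 hh)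
      rw [if_pos hc, if_pos hcc]
      unfold dSum
      ring
    · have hnc : ¬(y' = y ∧ x' = x ∧ pvGet2 hmap y x = h) := fun hq => hc ⟨hq.1, hq.2.1⟩
      rw [if_neg hc, if_neg hnc]
  · have hn1 : ¬(pvGet2 hmap y x = h ∧ 0 ≤ y + 1 ∧ y + 1 < H ∧ 0 ≤ x + 0 ∧ x + 0 < W ∧
        pvGet2 hmap (y + 1) (x + 0) = pvGet2 hmap y x + 1) := fun hq => hh hq.1
    have hn2 : ¬(pvGet2 hmap y x = h ∧ 0 ≤ y + 0 ∧ y + 0 < H ∧ 0 ≤ x + 1 ∧ x + 1 < W ∧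
        pvGet2 hmap (y + 0) (x + 1) = pvGet2 hmap y x + 1) := fun hq => hh hq.1
    have hn3 : ¬(pvGet2 hmap y x = h ∧ 0 ≤ y + -1 ∧ y + -1 < H ∧ 0 ≤ x + 0 ∧ x + 0 < W ∧
        pvGet2 hmap (y + -1) (x + 0) = pvGet2 hmap y x + 1) := fun hq => hh hq.1
    have hn4 : ¬(pvGet2 hmap y x = h ∧ 0 ≤ y + 0 ∧ y + 0 < H ∧ 0 ≤ x + -1 ∧ x + -1 < W ∧
        pvGet2 hmap (y + 0) (x + -1) = pvGet2 hmap y x + 1) := fun hq => hh hq.1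
    rw [if_neg hn1, if_neg hn2, if_neg hn3, if_neg hn4]
    refine ⟨hs, fun y' x' _ _ => ?_⟩
    have hnc : ¬(y' = y ∧ x' = x ∧ pvGet2 hmap y x = h) := fun hq => hh hq.2.2
    rw [if_neg hnc]

-- ---- phase 2: one row, one level ----

theorem p2x (hmap : List (List Int)) (H W h : Int)
    (hH : H ≤ (hmap.length : Int)) (hW : ∀ row ∈ hmap.take H.toNat, W ≤ (row.length : Int))
    (y : Int) (hy0 : 0 ≤ y) (hyH : y < H) :
    ∀ (xs : List Int) (s : List (List Int)), ShapeOK hmap s →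
      (∀ x ∈ xs, 0 ≤ x ∧ x < W) → xs.Nodup →
      ShapeOK hmap (xs.foldl (fun sc x => aCell hmap H W h sc y x) s) ∧
      ∀ y' x', 0 ≤ y' → 0 ≤ x' →
        pvGet2 (xs.foldl (fun sc x => aCell hmap H W h sc y x) s) y' x' =
          if y' = y ∧ x' ∈ xs ∧ pvGet2 hmap y' x' = h
          then pvGet2 s y' x' + dSum hmap H W s y' x' else pvGet2 s y' x' := by
  intro xs
  induction xs with
  | nil =>
    intro s hs _ _
    refine ⟨hs, fun y' x' _ _ => ?_⟩
    simp
  | cons x0 xs ih =>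
    intro s hs hxs hnd
    have hx0 := hxs x0 (by simp)
    have hx0nm : x0 ∉ xs := (List.nodup_cons.mp hnd).1
    simp only [List.foldl_cons]
    obtain ⟨hs', hp'⟩ := aCell_pv hmap H W h hH hW s hs y x0 hy0 hyH hx0.1 hx0.2
    obtain ⟨ihs, ihp⟩ := ih _ hs' (fun xq hq => hxs xq (by simp [hq])) (List.nodup_cons.mp hnd).2
    refine ⟨ihs, fun y' x' hy' hx' => ?_⟩
    rw [ihp y' x' hy' hx']
    by_cases h1 : y' = y ∧ x' ∈ xs ∧ pvGet2 hmap y' x' = h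
    · rw [if_pos h1]
      have e1 : pvGet2 (aCell hmap H W h s y x0) y' x' = pvGet2 s y' x' := by
        rw [hp' y' x' hy' hx', if_neg]
        intro hq
        exact hx0nm (hq.2.1 ▸ h1.2.1)
      have e2 : dSum hmap H W (aCell hmap H W h s y x0) y' x' = dSum hmap H W s y' x' := by
        apply dSum_congr
        intro yy xx hyy hxx hht
        rw [hp' yy xx hyy hxx, if_neg]
        intro hq
        rw [hq.1, hq.2.1, h1.2.2] at hht
        omega
      rw [e1, e2, if_pos ⟨h1.1, by simp [h1.2.1], h1.2.2⟩]
    · rw [if_neg h1, hp' y' x' hy' hx']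
      by_cases h2 : y' = y ∧ x' = x0 ∧ pvGet2 hmap y' x' = h
      · obtain ⟨e1, e2, e3⟩ := h2
        rw [if_pos ⟨e1, e2, by rw [← e1, ← e2]; exact e3⟩, ← e1, ← e2,
          if_pos ⟨rfl, by simp [e2], e3⟩]
      · rw [if_neg (fun hq => h2 ⟨hq.1, hq.2.1, by rw [hq.1, hq.2.1]; exact hq.2.2⟩), if_neg]
        intro hq
        obtain ⟨a, b, c⟩ := hq
        rcases List.mem_cons.mp b with b | b
        · exact h2 ⟨a, b, c⟩
        · exact h1 ⟨a, b, c⟩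

theorem p2y (hmap : List (List Int)) (H W h : Int)
    (hH : H ≤ (hmap.length : Int)) (hW : ∀ row ∈ hmap.take H.toNat, W ≤ (row.length : Int)) :
    ∀ (ys : List Int) (s : List (List Int)), ShapeOK hmap s →
      (∀ y ∈ ys, 0 ≤ y ∧ y < H) → ys.Nodup →
      ShapeOK hmap (ys.foldl (fun sc y => (PySem.List.pyRange 0 W 1).foldl
        (fun sc x => aCell hmap H W h sc y x) sc) s) ∧
      ∀ y' x', 0 ≤ y' → 0 ≤ x' →
        pvGet2 (ys.foldl (fun sc y => (PySem.List.pyRange 0 W 1).foldl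
          (fun sc x => aCell hmap H W h sc y x) sc) s) y' x' =
          if y' ∈ ys ∧ x' < W ∧ pvGet2 hmap y' x' = h
          then pvGet2 s y' x' + dSum hmap H W s y' x' else pvGet2 s y' x' := by
  intro ys
  induction ys with
  | nil =>
    intro s hs _ _
    refine ⟨hs, fun y' x' _ _ => ?_⟩
    simp
  | cons y0 ys ih =>
    intro s hs hys hnd
    have hy0 := hys y0 (by simp)
    have hy0nm : y0 ∉ ys := (List.nodup_cons.mp hnd).1
    simp only [List.foldl_cons]
    obtain ⟨hs', hp'⟩ := p2x hmap H W h hH hW y0 hy0.1 hy0.2 (PySem.List.pyRange 0 W 1) s hs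
      (fun x hx => PySem.List.mem_pyRange_one.mp hx) (PySem.List.nodup_pyRange_one 0 W)
    obtain ⟨ihs, ihp⟩ := ih _ hs' (fun yq hq => hys yq (by simp [hq])) (List.nodup_cons.mp hnd).2
    refine ⟨ihs, fun y' x' hy' hx' => ?_⟩
    rw [ihp y' x' hy' hx']
    by_cases h1 : y' ∈ ys ∧ x' < W ∧ pvGet2 hmap y' x' = h
    · rw [if_pos h1]
      have e1 : pvGet2 ((PySem.List.pyRange 0 W 1).foldl
          (fun sc x => aCell hmap H W h sc y0 x) s) y' x' = pvGet2 s y' x' := by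
        rw [hp' y' x' hy' hx', if_neg]
        intro hq
        exact hy0nm (hq.1 ▸ h1.1)
      have e2 : dSum hmap H W ((PySem.List.pyRange 0 W 1).foldl
          (fun sc x => aCell hmap H W h sc y0 x) s) y' x' = dSum hmap H W s y' x' := by
        apply dSum_congr
        intro yy xx hyy hxx hht
        rw [hp' yy xx hyy hxx, if_neg]
        intro hq
        rw [hq.2.2, h1.2.2] at hht
        omega
      rw [e1, e2, if_pos ⟨by simp [h1.1], h1.2.1, h1.2.2⟩]
    · rw [if_neg h1, hp' y' x' hy' hx']
      by_cases h2 : y' = y0 ∧ x' < W ∧ pvGet2 hmap y' x' = h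
      · rw [if_pos ⟨h2.1, PySem.List.mem_pyRange_one.mpr ⟨hx', h2.2.1⟩, h2.2.2⟩,
          if_pos ⟨by simp [h2.1], h2.2.1, h2.2.2⟩]
      · rw [if_neg (fun hq => h2 ⟨hq.1, (PySem.List.mem_pyRange_one.mp hq.2.1).2, hq.2.2⟩),
          if_neg]
        intro hq
        obtain ⟨a, b, c⟩ := hq
        rcases List.mem_cons.mp a with a | a
        · exact h2 ⟨a, b, c⟩
        · exact h1 ⟨a, b, c⟩

-- ---- phase 2: all levels, from 8 down to 0 ----

theorem p2all (hmap : List (List Int)) (H W : Int)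
    (hH : H ≤ (hmap.length : Int)) (hW : ∀ row ∈ hmap.take H.toNat, W ≤ (row.length : Int)) :
    ∀ (n : Nat) (h : Int), h + 1 = (n : Int) → h ≤ 8 →
      ∀ s, ShapeOK hmap s →
      (∀ y' x', 0 ≤ y' → 0 ≤ x' → pvGet2 s y' x' = Gv hmap H W (h + 1) y' x') →
      ∀ y' x', 0 ≤ y' → 0 ≤ x' →
        pvGet2 ((PySem.List.pyRange h (-1) (-1)).foldl (fun sc hh =>
          (PySem.List.pyRange 0 H 1).foldl (fun sc y =>
            (PySem.List.pyRange 0 W 1).foldl (fun sc x => aCell hmap H W hh sc y x) sc) sc) s)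
          y' x' = Gv hmap H W 0 y' x' := by
  intro n
  induction n with
  | zero =>
    intro h hn _ s _ hG y' x' hy' hx'
    have hm1 : h = -1 := by push_cast at hn; omega
    subst hm1
    rw [PySem.List.pyRange_neg_one_eq_nil (by norm_num), List.foldl_nil]
    have := hG y' x' hy' hx'
    rw [this]
    norm_num
  | succ n ihn =>
    intro h hn h8 s hs hG y' x' hy' hx'
    have hge : 0 ≤ h := by push_cast at hn; omega
    rw [PySem.List.pyRange_neg_one_cons (by omega : (-1 : Int) < h), List.foldl_cons]
    obtain ⟨hts, htp⟩ := p2y hmap H W h hH hW (PySem.List.pyRange 0 H 1) s hs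
      (fun yq hq => PySem.List.mem_pyRange_one.mp hq) (PySem.List.nodup_pyRange_one 0 H)
    have htG : ∀ ya xa, 0 ≤ ya → 0 ≤ xa →
        pvGet2 ((PySem.List.pyRange 0 H 1).foldl (fun sc y =>
          (PySem.List.pyRange 0 W 1).foldl (fun sc x => aCell hmap H W h sc y x) sc) s) ya xa =
        Gv hmap H W h ya xa := by
      intro ya xa hya hxa
      rw [htp ya xa hya hxa]
      by_cases hc : ya < H ∧ xa < W ∧ pvGet2 hmap ya xa = h
      · rw [if_pos ⟨PySem.List.mem_pyRange_one.mpr ⟨hya, hc.1⟩, hc.2.1, hc.2.2⟩]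
        rw [hG ya xa hya hxa]
        have hz : Gv hmap H W (h + 1) ya xa = 0 := by
          unfold Gv
          rw [if_neg]
          intro hq
          have := hq.2.1
          omega
        rw [hz, zero_add]
        -- dSum over s = the four Rv neighbour terms
        have hterm : ∀ dy dx : Int,
            (if 0 ≤ ya + dy ∧ ya + dy < H ∧ 0 ≤ xa + dx ∧ xa + dx < W ∧
              pvGet2 hmap (ya + dy) (xa + dx) = pvGet2 hmap ya xa + 1
            then pvGet2 s (ya + dy) (xa + dx) else 0)
            = (if 0 ≤ ya + dy ∧ ya + dy < H ∧ 0 ≤ xa + dx ∧ xa + dx < W ∧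
              pvGet2 hmap (ya + dy) (xa + dx) = pvGet2 hmap ya xa + 1
            then rat hmap H W 9 (ya + dy) (xa + dx) else 0) := by
          intro dy dx
          split_ifs with hcc
          · have hnb : pvGet2 hmap (ya + dy) (xa + dx) = h + 1 := by
              rw [hcc.2.2.2.2, hc.2.2]
            rw [hG _ _ hcc.1 hcc.2.2.1]
            unfold Gv
            have hcond : ((0 ≤ ya + dy ∧ ya + dy < H ∧ 0 ≤ xa + dx ∧ xa + dx < W) ∧
                h + 1 ≤ pvGet2 hmap (ya + dy) (xa + dx) ∧
                pvGet2 hmap (ya + dy) (xa + dx) ≤ 9) :=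
              ⟨⟨hcc.1, hcc.2.1, hcc.2.2.1, hcc.2.2.2.1⟩, by omega, by omega⟩
            rw [if_pos hcond]
            unfold Rv
            exact rat_stable hmap H W 10 9 _ _ (by omega) (by push_cast; omega)
              (by push_cast; omega)
          · rfl
        unfold dSum
        rw [hterm 1 0, hterm 0 1, hterm (-1) 0, hterm 0 (-1)]
        -- and Gv h at (ya, xa) is exactly Rv, which unfolds to that sum
        unfold Gv
        have hcond2 : ((0 ≤ ya ∧ ya < H ∧ 0 ≤ xa ∧ xa < W) ∧
            h ≤ pvGet2 hmap ya xa ∧ pvGet2 hmap ya xa ≤ 9) :=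
          ⟨⟨hya, hc.1, hxa, hc.2.1⟩, by omega, by omega⟩
        rw [if_pos hcond2]
        unfold Rv
        have hn9 : ¬pvGet2 hmap ya xa = 9 := by omega
        rw [show rat hmap H W 10 ya xa = rat hmap H W (9 + 1) ya xa from rfl,
          rat_unfold hmap H W 9 ya xa, if_neg hn9]
      · rw [if_neg (fun hq => hc ⟨(PySem.List.mem_pyRange_one.mp hq.1).2, hq.2.1, hq.2.2⟩)]
        rw [hG ya xa hya hxa]
        unfold Gv
        by_cases g1 : (0 ≤ ya ∧ ya < H ∧ 0 ≤ xa ∧ xa < W) ∧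
            h + 1 ≤ pvGet2 hmap ya xa ∧ pvGet2 hmap ya xa ≤ 9
        · rw [if_pos g1, if_pos ⟨g1.1, by omega, g1.2.2⟩]
        · rw [if_neg g1, if_neg]
          intro q
          refine g1 ⟨q.1, ?_, q.2.2⟩
          have hne : pvGet2 hmap ya xa ≠ h := fun e => hc ⟨q.1.2.1, q.1.2.2.2, e⟩
          omega
    exact ihn (h - 1) (by push_cast at hn ⊢; omega) (by omega) _ hts
      (by intro ya xa hya hxa
          rw [show h - 1 + 1 = h by ring]
          exact htG ya xa hya hxa) y' x' hy' hx'


-- ---- B side: the memo invariant and correctness of the memoized recursion ----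

def MInv (hmap : List (List Int)) (H W : Int) (memo : PySem.Dict (Int × Int) Int) : Prop :=
  ∀ y x v, memo.get? (y, x) = some v →
    0 ≤ pvGet2 hmap y x ∧ pvGet2 hmap y x ≤ 9 ∧ v = Rv hmap H W y x

theorem MInv_insert (hmap : List (List Int)) (H W : Int) (memo : PySem.Dict (Int × Int) Int)
    (hm : MInv hmap H W memo) (y x v : Int) (h0 : 0 ≤ pvGet2 hmap y x)
    (h9 : pvGet2 hmap y x ≤ 9) (hv : v = Rv hmap H W y x) :
    MInv hmap H W (memo.insert (y, x) v) := by
  intro ya xa va hg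
  rw [PySem.Dict.get?_insert] at hg
  by_cases hk : ((ya, xa) : Int × Int) = (y, x)
  · rw [if_pos hk] at hg
    injection hg with e
    have e1 : ya = y := congrArg Prod.fst hk
    have e2 : xa = x := congrArg Prod.snd hk
    subst e1; subst e2; subst e
    exact ⟨h0, h9, hv⟩
  · rw [if_neg hk] at hg
    exact hm _ _ _ hg

theorem MInv_empty (hmap : List (List Int)) (H W : Int) :
    MInv hmap H W PySem.Dict.empty := by
  intro y x v hg
  simp [PySem.Dict.get?_empty] at hg

theorem bGo_correct (hmap : List (List Int)) (H W : Int) :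
    ∀ (f : Nat) (y x : Int) (memo : PySem.Dict (Int × Int) Int), MInv hmap H W memo →
      0 ≤ pvGet2 hmap y x → pvGet2 hmap y x ≤ 9 → (10 : Int) - pvGet2 hmap y x ≤ (f : Int) →
      (bGo hmap H W f y x memo).1 = Rv hmap H W y x ∧
        MInv hmap H W (bGo hmap H W f y x memo).2 := by
  intro f
  induction f with
  | zero =>
    intro y x memo _ h0 h9 hf
    exfalso; push_cast at hf; omega
  | succ f ihf =>
    intro y x memo hm h0 h9 hf
    push_cast at hf
    simp only [bGo]
    cases hget : memo.get? (y, x) with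
    | some v =>
      obtain ⟨_, _, hv⟩ := hm y x v hget
      exact ⟨hv, hm⟩
    | none =>
      by_cases h99 : pvGet2 hmap y x = 9
      · rw [if_pos h99]
        exact ⟨(Rv_of_nine hmap H W y x h99).symm,
          MInv_insert hmap H W memo hm y x 1 h0 h9 (Rv_of_nine hmap H W y x h99).symm⟩
      · rw [if_neg h99]
        have hstep : ∀ (st : Int × PySem.Dict (Int × Int) Int) (acc : Int) (dy dx : Int),
            st.1 = acc → MInv hmap H W st.2 →
            ((if 0 ≤ y + dy ∧ y + dy < H ∧ 0 ≤ x + dx ∧ x + dx < W ∧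
                pvGet2 hmap (y + dy) (x + dx) = pvGet2 hmap y x + 1 then
              ((st.1 + (bGo hmap H W f (y + dy) (x + dx) st.2).1,
                (bGo hmap H W f (y + dy) (x + dx) st.2).2) : Int × PySem.Dict (Int × Int) Int)
            else st).1 = acc + (if 0 ≤ y + dy ∧ y + dy < H ∧ 0 ≤ x + dx ∧ x + dx < W ∧
                pvGet2 hmap (y + dy) (x + dx) = pvGet2 hmap y x + 1
              then Rv hmap H W (y + dy) (x + dx) else 0)) ∧
            MInv hmap H W (if 0 ≤ y + dy ∧ y + dy < H ∧ 0 ≤ x + dx ∧ x + dx < W ∧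
                pvGet2 hmap (y + dy) (x + dx) = pvGet2 hmap y x + 1 then
              ((st.1 + (bGo hmap H W f (y + dy) (x + dx) st.2).1,
                (bGo hmap H W f (y + dy) (x + dx) st.2).2) : Int × PySem.Dict (Int × Int) Int)
            else st).2 := by
          intro st acc dy dx hacc hinv
          by_cases hc : 0 ≤ y + dy ∧ y + dy < H ∧ 0 ≤ x + dx ∧ x + dx < W ∧
              pvGet2 hmap (y + dy) (x + dx) = pvGet2 hmap y x + 1
          · simp only [if_pos hc]
            obtain ⟨hv, hmv⟩ := ihf (y + dy) (x + dx) st.2 hinv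
              (by rw [hc.2.2.2.2]; omega) (by rw [hc.2.2.2.2]; omega)
              (by rw [hc.2.2.2.2]; push_cast; omega)
            exact ⟨by rw [hacc, hv], hmv⟩
          · simp only [if_neg hc]
            exact ⟨by rw [hacc, add_zero], hinv⟩
        have hsum : (0 : Int) + (if 0 ≤ y + 1 ∧ y + 1 < H ∧ 0 ≤ x + 0 ∧ x + 0 < W ∧
              pvGet2 hmap (y + 1) (x + 0) = pvGet2 hmap y x + 1
              then Rv hmap H W (y + 1) (x + 0) else 0)
            + (if 0 ≤ y + 0 ∧ y + 0 < H ∧ 0 ≤ x + 1 ∧ x + 1 < W ∧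
              pvGet2 hmap (y + 0) (x + 1) = pvGet2 hmap y x + 1
              then Rv hmap H W (y + 0) (x + 1) else 0)
            + (if 0 ≤ y + -1 ∧ y + -1 < H ∧ 0 ≤ x + 0 ∧ x + 0 < W ∧
              pvGet2 hmap (y + -1) (x + 0) = pvGet2 hmap y x + 1
              then Rv hmap H W (y + -1) (x + 0) else 0)
            + (if 0 ≤ y + 0 ∧ y + 0 < H ∧ 0 ≤ x + -1 ∧ x + -1 < W ∧
              pvGet2 hmap (y + 0) (x + -1) = pvGet2 hmap y x + 1
              then Rv hmap H W (y + 0) (x + -1) else 0)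
            = Rv hmap H W y x := by
          have hterm : ∀ dy dx : Int,
              (if 0 ≤ y + dy ∧ y + dy < H ∧ 0 ≤ x + dx ∧ x + dx < W ∧
                pvGet2 hmap (y + dy) (x + dx) = pvGet2 hmap y x + 1
              then Rv hmap H W (y + dy) (x + dx) else 0)
              = (if 0 ≤ y + dy ∧ y + dy < H ∧ 0 ≤ x + dx ∧ x + dx < W ∧
                pvGet2 hmap (y + dy) (x + dx) = pvGet2 hmap y x + 1
              then rat hmap H W 9 (y + dy) (x + dx) else 0) := by
            intro dy dx
            split_ifs with hcc
            · unfold Rv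
              exact rat_stable hmap H W 10 9 _ _ (by rw [hcc.2.2.2.2]; omega)
                (by rw [hcc.2.2.2.2]; push_cast; omega)
                (by rw [hcc.2.2.2.2]; push_cast; omega)
            · rfl
          rw [hterm 1 0, hterm 0 1, hterm (-1) 0, hterm 0 (-1)]
          rw [show Rv hmap H W y x = rat hmap H W (9 + 1) y x from rfl,
            rat_unfold hmap H W 9 y x, if_neg h99, zero_add]
        have h1 := hstep ((0 : Int), memo) 0 1 0 rfl hm
        have h2 := hstep _ _ 0 1 h1.1 h1.2
        have h3 := hstep _ _ (-1) 0 h2.1 h2.2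
        have h4 := hstep _ _ 0 (-1) h3.1 h3.2
        exact ⟨h4.1.trans hsum, MInv_insert hmap H W _ h4.2 y x _ h0 h9 (h4.1.trans hsum)⟩

-- ---- B side: the two summation loops ----

theorem bAltx (hmap : List (List Int)) (H W y : Int) :
    ∀ (xs : List Int) (st : Int × PySem.Dict (Int × Int) Int), MInv hmap H W st.2 →
      ((xs.foldl (fun st x =>
          if pvGet2 hmap y x = 0 then
            let p := bGo hmap H W 10 y x st.2
            (st.1 + p.1, p.2)
          else st) st).1
        = st.1 + (xs.map (fun x => if pvGet2 hmap y x = 0 then Rv hmap H W y x else 0)).sum)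
      ∧ MInv hmap H W (xs.foldl (fun st x =>
          if pvGet2 hmap y x = 0 then
            let p := bGo hmap H W 10 y x st.2
            (st.1 + p.1, p.2)
          else st) st).2 := by
  intro xs
  induction xs with
  | nil => intro st hm; exact ⟨by simp, hm⟩
  | cons x0 xs ih =>
    intro st hm
    simp only [List.foldl_cons]
    by_cases hc : pvGet2 hmap y x0 = 0
    · obtain ⟨hv, hmv⟩ := bGo_correct hmap H W 10 y x0 st.2 hm (by simp [hc])
        (by simp [hc]) (by simp [hc])
      obtain ⟨ih1, ih2⟩ := ih ((st.1 + (bGo hmap H W 10 y x0 st.2).1,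
        (bGo hmap H W 10 y x0 st.2).2) : Int × PySem.Dict (Int × Int) Int) hmv
      have e2 : st.1 + (bGo hmap H W 10 y x0 st.2).1 +
          (xs.map (fun x => if pvGet2 hmap y x = 0 then Rv hmap H W y x else 0)).sum
          = st.1 + ((x0 :: xs).map
            (fun x => if pvGet2 hmap y x = 0 then Rv hmap H W y x else 0)).sum := by
        simp only [List.map_cons, List.sum_cons, if_pos hc, hv]
        ring
      have egoal : (if pvGet2 hmap y x0 = 0 then
          (let p := bGo hmap H W 10 y x0 st.2; ((st.1 + p.1, p.2) :
            Int × PySem.Dict (Int × Int) Int))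
          else st) = ((st.1 + (bGo hmap H W 10 y x0 st.2).1,
            (bGo hmap H W 10 y x0 st.2).2) : Int × PySem.Dict (Int × Int) Int) := by
        rw [if_pos hc]
      rw [egoal]
      exact ⟨ih1.trans e2, ih2⟩
    · have egoal : (if pvGet2 hmap y x0 = 0 then
          (let p := bGo hmap H W 10 y x0 st.2; ((st.1 + p.1, p.2) :
            Int × PySem.Dict (Int × Int) Int))
          else st) = st := by
        rw [if_neg hc]
      rw [egoal]
      obtain ⟨ih1, ih2⟩ := ih st hm
      refine ⟨ih1.trans ?_, ih2⟩
      simp only [List.map_cons, List.sum_cons, if_neg hc]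
      ring

theorem bAlty (hmap : List (List Int)) (H W : Int) :
    ∀ (ys : List Int) (st : Int × PySem.Dict (Int × Int) Int), MInv hmap H W st.2 →
      ((ys.foldl (fun st y => (PySem.List.pyRange 0 W 1).foldl (fun st x =>
          if pvGet2 hmap y x = 0 then
            let p := bGo hmap H W 10 y x st.2
            (st.1 + p.1, p.2)
          else st) st) st).1
        = st.1 + (ys.map (fun y => ((PySem.List.pyRange 0 W 1).map
            (fun x => if pvGet2 hmap y x = 0 then Rv hmap H W y x else 0)).sum)).sum)
      ∧ MInv hmap H W (ys.foldl (fun st y => (PySem.List.pyRange 0 W 1).foldl (fun st x =>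
          if pvGet2 hmap y x = 0 then
            let p := bGo hmap H W 10 y x st.2
            (st.1 + p.1, p.2)
          else st) st) st).2 := by
  intro ys
  induction ys with
  | nil => intro st hm; exact ⟨by simp, hm⟩
  | cons y0 ys ih =>
    intro st hm
    simp only [List.foldl_cons]
    obtain ⟨h1, h2⟩ := bAltx hmap H W y0 (PySem.List.pyRange 0 W 1) st hm
    obtain ⟨ih1, ih2⟩ := ih _ h2
    refine ⟨ih1.trans ?_, ih2⟩
    rw [h1]
    simp only [List.map_cons, List.sum_cons]
    ring

-- the common target value: the double sum of ratings over the height-0 window cells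
def tgt (hmap : List (List Int)) (H W : Int) : Int :=
  ((PySem.List.pyRange 0 H 1).map (fun y => ((PySem.List.pyRange 0 W 1).map
    (fun x => if pvGet2 hmap y x = 0 then Rv hmap H W y x else 0)).sum)).sum

theorem alt_eq_tgt (hmap : List (List Int)) (H W : Int) :
    walk_b_alt hmap H W = tgt hmap H W := by
  unfold walk_b_alt tgt
  obtain ⟨h1, _⟩ := bAlty hmap H W (PySem.List.pyRange 0 H 1) ((0 : Int), PySem.Dict.empty)
    (MInv_empty hmap H W)
  exact h1.trans (by rw [zero_add])

-- ---- A side: the final accumulation loop, and the main chain ----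

theorem foldl_if_add (p : Int → Prop) [DecidablePred p] (g : Int → Int) :
    ∀ (l : List Int) (a : Int),
      l.foldl (fun acc x => if p x then acc + g x else acc) a
        = a + (l.map (fun x => if p x then g x else 0)).sum := by
  intro l
  induction l with
  | nil => intro a; simp
  | cons x0 l ih =>
    intro a
    simp only [List.foldl_cons]
    by_cases hc : p x0
    · rw [if_pos hc, ih]
      simp only [List.map_cons, List.sum_cons, if_pos hc]
      ring
    · rw [if_neg hc, ih]
      simp only [List.map_cons, List.sum_cons, if_neg hc]
      ring

theorem foldl_outer (l : List Int) (F : Int → Int → Int) (Sy : Int → Int)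
    (h : ∀ y ∈ l, ∀ acc, F acc y = acc + Sy y) :
    ∀ a, l.foldl F a = a + (l.map Sy).sum := by
  induction l with
  | nil => intro a; simp
  | cons y0 l ih =>
    intro a
    simp only [List.foldl_cons]
    rw [h y0 (by simp) a, ih (fun y hy => h y (by simp [hy]))]
    simp only [List.map_cons, List.sum_cons]
    ring

theorem getD_map_zero (row : List Int) (j : Nat) :
    (row.map (fun _ => (0 : Int))).getD j 0 = 0 := by
  rcases lt_or_ge j row.length with hj | hj
  · rw [List.getD_eq_getElem _ _ (by simpa using hj)]
    simp
  · rw [List.getD_eq_default _ _ (by simpa using hj)]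

theorem getD_row_map (hmap : List (List Int)) (i : Nat) :
    (hmap.map (fun row => row.map (fun _ => (0 : Int)))).getD i [] =
      (hmap.getD i []).map (fun _ => (0 : Int)) := by
  rcases lt_or_ge i hmap.length with hi | hi
  · rw [List.getD_eq_getElem _ _ (by simpa using hi), List.getD_eq_getElem _ _ hi]
    simp
  · rw [List.getD_eq_default _ _ (by simpa using hi), List.getD_eq_default _ _ hi]
    rfl

theorem walk_b_eq_tgt (hmap : List (List Int)) (H W : Int)
    (h0H : 0 < H) (h0W : 0 < W)
    (hH : H ≤ (hmap.length : Int)) (hW : ∀ row ∈ hmap.take H.toNat, W ≤ (row.length : Int)) :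
    walk_b hmap H W = tgt hmap H W := by
  unfold walk_b
  -- the zero matrix
  have hs0 : ShapeOK hmap (hmap.map (fun row => row.map (fun _ => (0 : Int)))) := by
    refine ⟨by simp, fun i => ?_⟩
    rw [getD_row_map]
    simp
  have hs0pv : ∀ y' x', 0 ≤ y' → 0 ≤ x' →
      pvGet2 (hmap.map (fun row => row.map (fun _ => (0 : Int)))) y' x' = 0 := by
    intro y' x' hy' hx'
    rw [pvGet2_eq _ _ _ hy' hx', getD_row_map, getD_map_zero]
  -- phase 1
  obtain ⟨hs1, hp1⟩ := p1y hmap H W hH hW (PySem.List.pyRange 0 H 1)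
    (hmap.map (fun row => row.map (fun _ => (0 : Int)))) hs0
    (fun yq hq => PySem.List.mem_pyRange_one.mp hq)
  have hs1G : ∀ y' x', 0 ≤ y' → 0 ≤ x' →
      pvGet2 ((PySem.List.pyRange 0 H 1).foldl (fun sc y =>
        (PySem.List.pyRange 0 W 1).foldl (fun sc x =>
          if pvGet2 hmap y x = 9 then aSet2 sc y x 1 else sc) sc)
        (hmap.map (fun row => row.map (fun _ => (0 : Int))))) y' x' =
      Gv hmap H W (8 + 1) y' x' := by
    intro y' x' hy' hx'
    rw [hp1 y' x' hy' hx']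
    unfold Gv
    by_cases hc : y' ∈ PySem.List.pyRange 0 H 1 ∧ x' < W ∧ pvGet2 hmap y' x' = 9
    · rw [if_pos hc, if_pos ⟨⟨hy', (PySem.List.mem_pyRange_one.mp hc.1).2, hx', hc.2.1⟩,
        by rw [hc.2.2]; norm_num, by rw [hc.2.2]⟩]
      exact (Rv_of_nine hmap H W y' x' hc.2.2).symm
    · rw [if_neg hc, hs0pv y' x' hy' hx', if_neg]
      intro hq
      refine hc ⟨PySem.List.mem_pyRange_one.mpr ⟨hy', hq.1.2.1⟩, hq.1.2.2.2, by omega⟩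
  -- phase 2, all levels
  have hp2 := p2all hmap H W hH hW 9 8 (by norm_num) (by norm_num) _ hs1 hs1G
  -- final loop
  have hout : ∀ yq ∈ PySem.List.pyRange 0 H 1, ∀ acc : Int,
      (PySem.List.pyRange 0 W 1).foldl (fun ans x =>
        if pvGet2 hmap yq x = 0 then ans + pvGet2 ((PySem.List.pyRange 8 (-1) (-1)).foldl
          (fun sc h => (PySem.List.pyRange 0 H 1).foldl (fun sc y =>
            (PySem.List.pyRange 0 W 1).foldl (fun sc x => aCell hmap H W h sc y x) sc) sc)
          ((PySem.List.pyRange 0 H 1).foldl (fun sc y =>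
            (PySem.List.pyRange 0 W 1).foldl (fun sc x =>
              if pvGet2 hmap y x = 9 then aSet2 sc y x 1 else sc) sc)
            (hmap.map (fun row => row.map (fun _ => (0 : Int)))))) yq x else ans) acc
      = acc + ((PySem.List.pyRange 0 W 1).map
          (fun x => if pvGet2 hmap yq x = 0 then Rv hmap H W yq x else 0)).sum := by
    intro yq hyq acc
    rw [foldl_if_add (fun x => pvGet2 hmap yq x = 0) _ (PySem.List.pyRange 0 W 1) acc]
    congr 1
    refine congrArg List.sum ?_
    apply List.map_congr_left
    intro xq hxq
    by_cases hc : pvGet2 hmap yq xq = 0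
    · rw [if_pos hc, if_pos hc]
      have hyq' := PySem.List.mem_pyRange_one.mp hyq
      have hxq' := PySem.List.mem_pyRange_one.mp hxq
      refine (hp2 yq xq hyq'.1 hxq'.1).trans ?_
      unfold Gv
      rw [if_pos ⟨⟨hyq'.1, hyq'.2, hxq'.1, hxq'.2⟩, by omega, by omega⟩]
    · rw [if_neg hc, if_neg hc]
  have e := foldl_outer (PySem.List.pyRange 0 H 1) _ _ hout 0
  refine e.trans ?_
  rw [zero_add]
  rfl

-- ===== VERDICT (by name: the statement is the Claim_ definition above) =====
theorem walk_b_spec : Claim_equal_walk_b := by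
  unfold Claim_equal_walk_b
  intro hmap H W _ hpre
  unfold Spec_walk_b
  rw [alt_eq_tgt]
  by_cases h0H : 0 < H
  · by_cases h0W : 0 < W
    · obtain ⟨hH, hW⟩ := hpre h0H h0W
      exact walk_b_eq_tgt hmap H W h0H h0W hH hW
    · unfold walk_b tgt
      rw [PySem.List.pyRange_one_eq_nil (show W ≤ (0 : Int) by omega)]
      simp [PySem.List.foldl_ignore]
  · unfold walk_b tgt
    rw [PySem.List.pyRange_one_eq_nil (show H ≤ (0 : Int) by omega)]
    simp
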